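-- pv_equiv track=rewrite | github.com/pexley-math/oeis-A395434 | code/generate-figures.py | proved_terms
-- ===== SOURCE A (Python) =====
-- def proved_terms(results):
--     """Return list of (n, entry) for n where status == 'PROVED', sorted by n."""
--     out = []
--     for k in sorted(results, key=lambda x: int(x) if x.isdigit() else 10**9):
--         if not k.isdigit():
--             continue
--         entry = results[k]
--         if isinstance(entry, dict) and entry.get("status") == "PROVED":
--             out.append((int(k), entry))
--     return out
-- ===== SOURCE B (Python) =====
-- def proved_terms(results):
--     """Return list of (n, entry) for n where status == 'PROVED', sorted by n."""
--     out = []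
--     for k, entry in results.items():
--         if k.isdigit() and entry.get("status") == "PROVED":
--             n = int(k)
--             i = 0
--             while i < len(out) and out[i][0] <= n:
--                 i += 1
--             out.insert(i, (n, entry))
--     return out
-- ===== Notes on version B (the rewrite author's own statement) =====
-- stated objective: alternative
-- what changed: B never calls sorted: it makes ONE pass over the items and keeps its accumulator sorted at all times by inserting each kept (int(k), entry) pair after the last element with a smaller-or-equal key (an online insertion sort), whereas A sorts ALL keys under a 10**9 sentinel key and then filters in a second loop with dict lookups; B trades the O(n log n) library sort for a simpler single pass with quadratic worst-case inserts.
import Mathlib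
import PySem

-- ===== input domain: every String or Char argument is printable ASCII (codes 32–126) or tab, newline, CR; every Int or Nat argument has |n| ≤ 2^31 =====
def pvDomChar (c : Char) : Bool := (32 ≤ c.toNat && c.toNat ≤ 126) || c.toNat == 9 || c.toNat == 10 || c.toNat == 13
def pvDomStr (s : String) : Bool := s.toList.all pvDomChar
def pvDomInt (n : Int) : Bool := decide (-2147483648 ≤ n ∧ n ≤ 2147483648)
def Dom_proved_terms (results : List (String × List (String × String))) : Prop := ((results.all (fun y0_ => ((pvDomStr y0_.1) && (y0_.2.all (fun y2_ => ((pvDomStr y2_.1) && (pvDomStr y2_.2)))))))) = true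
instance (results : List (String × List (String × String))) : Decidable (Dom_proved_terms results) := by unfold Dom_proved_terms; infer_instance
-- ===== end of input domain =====

-- B makes one pass over the items, inserting each kept (int(k), entry) pair into an
-- always-sorted accumulator (online insertion sort, no call to sorted and no 10**9
-- sentinel), instead of A's sort of all keys followed by a filtering loop; objective: alternative.


-- ===== PORT A =====
-- Literal port of A: sort the dict's keys with key `int(x) if x.isdigit() else 10**9`,
-- then loop: skip non-digit keys, look the entry up, append (int(k), entry) when PROVED.
-- `(PySem.Int.ofStr? k).getD 0` is exact: `int(k)` cannot fail when `k.isdigit()`.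
-- `.getD []` on the dict lookup is exact: `k` is drawn from the dict's own keys.
def proved_terms (results : List (String × List (String × String))) : List (Int × (List (String × String))) :=
  (PySem.List.sorted (results.map (·.1))
      (fun x => if PySem.Str.strIsdigit x then (PySem.Int.ofStr? x).getD 0 else 10 ^ 9) false).foldl
    (fun out k =>
      if !PySem.Str.strIsdigit k then out
      else
        let entry := ((PySem.Dict.mk results).get? k).getD []
        if (PySem.Dict.mk entry).get? "status" = some "PROVED" then
          out ++ [(((PySem.Int.ofStr? k).getD 0 : Int), entry)]
        else out)
    []

-- ===== PORT B =====
-- Literal port of B's inner insertion: scan `out` from the left past every element whose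
-- key is ≤ n, then insert (n, entry) there — the structural-recursion transcription of
-- B's `while i < len(out) and out[i][0] <= n: i += 1; out.insert(i, …)`.
def pvInsert (p : Int × List (String × String)) :
    List (Int × List (String × String)) → List (Int × List (String × String))
  | [] => [p]
  | q :: rest => if q.1 ≤ p.1 then q :: pvInsert p rest else p :: q :: rest

-- Literal port of B: one pass over the items; each digit-keyed PROVED entry is inserted
-- into the always-sorted accumulator with pvInsert.
def proved_terms_alt (results : List (String × List (String × String))) : List (Int × (List (String × String))) :=
  results.foldl
    (fun out kv =>
      if PySem.Str.strIsdigit kv.1 && decide ((PySem.Dict.mk kv.2).get? "status" = some "PROVED") then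
        pvInsert (((PySem.Int.ofStr? kv.1).getD 0 : Int), kv.2) out
      else out)
    []

-- ===== PRECONDITION & SPEC =====
-- Pre_ excludes association lists whose keys repeat: a Python dict cannot hold duplicate
-- keys, so such lists represent no input of the original program.
def Pre_proved_terms (results : List (String × List (String × String))) : Prop :=
  (results.map (·.1)).Nodup
instance (results : List (String × List (String × String))) : Decidable (Pre_proved_terms results) := by unfold Pre_proved_terms; infer_instance

def pvWitness_proved_terms : (List (String × List (String × String))) :=
  [("3", [("status", "PROVED")]), ("x", []), ("2", [("status", "OPEN")]), ("10", [("status", "PROVED")])]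

def Spec_proved_terms (results : List (String × List (String × String))) (out : List (Int × (List (String × String)))) : Prop := out = proved_terms_alt results
instance (results : List (String × List (String × String))) (out : List (Int × (List (String × String)))) : Decidable (Spec_proved_terms results out) := by unfold Spec_proved_terms; infer_instance

-- ===== CLAIM (what is proved, stated in full; the proofs are below) =====
def Claim_equal_proved_terms : Prop := ∀ (results : List (String × List (String × String))), Dom_proved_terms results → Pre_proved_terms results → Spec_proved_terms results (proved_terms results)

-- ===== LEMMAS AND PROOFS =====

-- B's hand-written insertion is the stable insertion step of PySem's sort by first key.
theorem pvInsert_eq_insertBy (p : Int × List (String × String))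
    (l : List (Int × List (String × String))) :
    pvInsert p l = PySem.List.insertBy (fun a b => decide (a.1 < b.1)) p l := by
  induction l with
  | nil => rfl
  | cons q rest ih =>
    simp only [pvInsert, PySem.List.insertBy]
    by_cases h : q.1 ≤ p.1
    · simp [h, not_lt.mpr h, ih]
    · simp [h, lt_of_not_ge h]

-- A conditional fold is the fold of the filtered-and-mapped list.
theorem foldl_if_filter_map {α β γ : Type} (P : α → Bool) (f : α → β) (g : β → γ → γ)
    (xs : List α) (init : γ) :
    xs.foldl (fun acc x => if P x then g (f x) acc else acc) init
      = ((xs.filter P).map f).foldl (fun acc y => g y acc) init := by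
  induction xs generalizing init with
  | nil => rfl
  | cons x rest ih =>
    by_cases h : P x = true <;> simp [h, ih]

-- B computes the stable sort (by first key) of the filtered-and-mapped item list.
theorem alt_eq_sorted (results : List (String × List (String × String))) :
    proved_terms_alt results
      = PySem.List.sorted
          ((results.filter
              (fun p => PySem.Str.strIsdigit p.1 && decide ((PySem.Dict.mk p.2).get? "status" = some "PROVED"))).map
            (fun p => (((PySem.Int.ofStr? p.1).getD 0 : Int), p.2)))
          (fun t => t.1) false := by
  unfold proved_terms_alt
  rw [PySem.List.sorted_eq_foldl_insertBy]
  rw [foldl_if_filter_map]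
  refine PySem.List.foldl_congr_mem _ _ _ _ (fun acc y _ => pvInsert_eq_insertBy y acc)

-- Inserting an element all of whose comparisons say "goes first" just conses it.
theorem insertBy_eq_cons {α : Type} (bf : α → α → Bool) (x : α) (l : List α)
    (h : ∀ z ∈ l, bf x z = true) : PySem.List.insertBy bf x l = x :: l := by
  cases l with
  | nil => rfl
  | cons y ys => simp [PySem.List.insertBy, h y (by simp)]

-- One more insertion step of the stable insertion sort.
theorem sorted_append_singleton {α κ : Type} [LinearOrder κ] (xs : List α) (x : α)
    (key : α → κ) :
    PySem.List.sorted (xs ++ [x]) key false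
      = PySem.List.insertBy (fun a b => decide (key a < key b)) x
          (PySem.List.sorted xs key false) := by
  simp only [PySem.List.sorted_eq_foldl_insertBy, List.foldl_append, List.foldl_cons,
    List.foldl_nil]

-- Filtering past an inserted element that the filter drops leaves the list unchanged.
theorem filter_insertBy_neg {α : Type} (bf : α → α → Bool) (P : α → Bool) (x : α)
    (l : List α) (hx : P x = false) :
    (PySem.List.insertBy bf x l).filter P = l.filter P := by
  induction l with
  | nil => simp [PySem.List.insertBy, hx]
  | cons y ys ih =>
    simp only [PySem.List.insertBy]
    by_cases hb : bf x y = true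
    · simp [hb, hx]
    · simp only [hb, List.filter_cons]
      by_cases hy : P y = true <;> simp [hy, ih]

-- On a list sorted by `key`, filtering commutes with stable insertion by `key`.
theorem filter_insertBy_pos {α : Type} (key : α → Int) (P : α → Bool) (x : α)
    (l : List α) (hx : P x = true)
    (hs : l.Pairwise (fun a b => key a ≤ key b)) :
    (PySem.List.insertBy (fun a b => decide (key a < key b)) x l).filter P
      = PySem.List.insertBy (fun a b => decide (key a < key b)) x (l.filter P) := by
  induction l with
  | nil => simp [PySem.List.insertBy, hx]
  | cons y ys ih =>
    rcases List.pairwise_cons.mp hs with ⟨hy, hys⟩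
    simp only [PySem.List.insertBy]
    by_cases hb : key x < key y
    · simp only [decide_eq_true_eq, hb, if_true, List.filter_cons, hx]
      by_cases hPy : P y = true
      · simp only [hPy, if_true]
        rw [insertBy_eq_cons]
        intro z hz
        rcases List.mem_cons.mp hz with hz | hz
        · subst hz; simp [hb]
        · have := hy _ (List.mem_of_mem_filter hz); simp; omega
      · simp only [hPy, Bool.false_eq_true, if_false]
        rw [insertBy_eq_cons]
        intro z hz
        have := hy _ (List.mem_of_mem_filter hz); simp; omega
    · simp only [decide_eq_true_eq, hb, if_false, List.filter_cons]
      by_cases hPy : P y = true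
      · simp [hPy, PySem.List.insertBy, hb, ih hys]
      · simp [hPy, ih hys]

-- Mapping commutes with insertion when the comparisons agree through the map.
theorem map_insertBy {α β : Type} (bf : α → α → Bool) (bf' : β → β → Bool)
    (f : α → β) (x : α) (l : List α)
    (h : ∀ y ∈ l, bf' (f x) (f y) = bf x y) :
    (PySem.List.insertBy bf x l).map f = PySem.List.insertBy bf' (f x) (l.map f) := by
  induction l with
  | nil => simp [PySem.List.insertBy]
  | cons y ys ih =>
    simp only [PySem.List.insertBy, List.map_cons]
    rw [h y (by simp)]
    by_cases hb : bf x y = true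
    · simp [hb]
    · simp only [hb, Bool.false_eq_true, if_false, List.map_cons]
      rw [ih (fun z hz => h z (List.mem_cons_of_mem _ hz))]

-- Main commutation: filter+map after a stable sort = stable sort of the filtered+mapped
-- list, when the two sort keys agree on every kept element.
theorem sort_filter_map {α β : Type} (xs : List α) (key : α → Int) (P : α → Bool)
    (f : α → β) (keyB : β → Int) (hk : ∀ a, P a = true → keyB (f a) = key a) :
    ((PySem.List.sorted xs key false).filter P).map f
      = PySem.List.sorted ((xs.filter P).map f) keyB false := by
  induction xs using List.reverseRecOn with
  | nil => simp [PySem.List.sorted]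
  | append_singleton xs x ih =>
    rw [sorted_append_singleton]
    by_cases hx : P x = true
    · have hfilt : (xs ++ [x]).filter P = xs.filter P ++ [x] := by simp [hx]
      rw [filter_insertBy_pos key P x _ hx (PySem.List.sorted_pairwise xs key)]
      rw [map_insertBy _ (fun a b => decide (keyB a < keyB b)) f x _
        (fun y hy => by simp [hk x hx, hk y (List.of_mem_filter hy)])]
      rw [ih, hfilt, List.map_append, List.map_singleton, sorted_append_singleton]
    · have hfilt : (xs ++ [x]).filter P = xs.filter P := by
        simp [List.filter_append, hx]
      rw [filter_insertBy_neg _ P x _ (by simpa using hx), ih, hfilt]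

-- First-match lookup in a duplicate-free association list finds each pair's own value.
theorem get?_mk_of_nodup (results : List (String × List (String × String)))
    (h : (results.map (·.1)).Nodup) (p : String × List (String × String))
    (hp : p ∈ results) : (PySem.Dict.mk results).get? p.1 = some p.2 := by
  induction results with
  | nil => cases hp
  | cons q rest ih =>
    simp only [List.map_cons, List.nodup_cons] at h
    rw [PySem.Dict.get?_mk_cons]
    rcases List.mem_cons.mp hp with hp | hp
    · subst hp; simp
    · have hne : q.1 ≠ p.1 := by
        intro he
        exact h.1 (he ▸ List.mem_map_of_mem hp)
      simp only [beq_iff_eq, hne, if_false]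
      exact ih h.2 hp

-- ===== VERDICT (by name: the statement is the Claim_ definition above) =====
theorem proved_terms_spec : Claim_equal_proved_terms := by
  intro results _ hnd
  unfold Spec_proved_terms proved_terms
  rw [alt_eq_sorted]
  -- A's loop body is an append-if over the sorted key list
  refine Eq.trans (PySem.List.foldl_congr_mem _ _
    (fun out k =>
      if (PySem.Str.strIsdigit k &&
          decide ((PySem.Dict.mk (((PySem.Dict.mk results).get? k).getD [])).get? "status" = some "PROVED")) then
        out ++ [(((PySem.Int.ofStr? k).getD 0 : Int), ((PySem.Dict.mk results).get? k).getD [])]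
      else out) _
    (by
      intro out k _
      by_cases hd : PySem.Chars.strIsdigit k.toList = true
      · by_cases hs : (PySem.Dict.mk (((PySem.Dict.mk results).get? k).getD [])).get? "status" = some "PROVED"
          <;> simp [hd, hs]
      · simp [hd])) ?_
  rw [PySem.List.foldl_append_if, List.nil_append]
  rw [sort_filter_map (results.map (·.1))
    (fun x => if PySem.Str.strIsdigit x then (PySem.Int.ofStr? x).getD 0 else 10 ^ 9)
    _ _ (fun t => t.1)
    (by
      intro a ha
      simp only [Bool.and_eq_true, PySem.Str.strIsdigit_eq] at ha
      simp [ha.1])]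
  -- the filtered-mapped key list equals the filtered-mapped item list (keys are unique)
  congr 1
  rw [List.filter_map, List.map_map]
  rw [List.filter_congr
    (q := fun p => PySem.Str.strIsdigit p.1 && decide ((PySem.Dict.mk p.2).get? "status" = some "PROVED"))
    (by
      intro p hp
      simp only [Function.comp_apply]
      rw [get?_mk_of_nodup results hnd p hp]
      rfl)]
  apply List.map_congr_left
  intro p hp
  simp only [Function.comp_apply]
  rw [get?_mk_of_nodup results hnd p (List.mem_of_mem_filter hp)]
  rfl
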